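-- pv_equiv track=rewrite | github.com/JayB202/code_practice | 백준/Silver/1072. 게임/게임.py | findratio
-- ===== SOURCE A (Python) =====
-- def findratio(x, y):
--     left = 0
--     right = x
--
--     ratio = int((100*y)//x)
--
--     if 99 <= ratio:
--         return -1
--     else:
--         while left <= right:
--             mid = (left+right)//2
--             newratio = (y+mid) * 100 // (x+mid)
--             if  ratio < newratio:
--                 right = mid - 1
--             else:
--                 left = mid+1
--
--     return left
-- ===== SOURCE B (Python) =====
-- def findratio(x, y):
--     ratio = 100 * y // x
--     if ratio >= 99:
--         return -1
--     num = (ratio + 1) * x - 100 * y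
--     d = 99 - ratio
--     return (num + d - 1) // d
-- ===== Notes on version B (the rewrite author's own statement) =====
-- stated objective: faster
-- what changed: Replaces the binary-search loop over [0, x] with a closed-form integer ceiling: the answer is the least m with m*(99-ratio) >= (ratio+1)*x - 100*y, computed directly as one ceiling division.
-- outside the precondition, e.g. on findratio(-50, -49): A returns 0, B returns -50
import Mathlib
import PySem

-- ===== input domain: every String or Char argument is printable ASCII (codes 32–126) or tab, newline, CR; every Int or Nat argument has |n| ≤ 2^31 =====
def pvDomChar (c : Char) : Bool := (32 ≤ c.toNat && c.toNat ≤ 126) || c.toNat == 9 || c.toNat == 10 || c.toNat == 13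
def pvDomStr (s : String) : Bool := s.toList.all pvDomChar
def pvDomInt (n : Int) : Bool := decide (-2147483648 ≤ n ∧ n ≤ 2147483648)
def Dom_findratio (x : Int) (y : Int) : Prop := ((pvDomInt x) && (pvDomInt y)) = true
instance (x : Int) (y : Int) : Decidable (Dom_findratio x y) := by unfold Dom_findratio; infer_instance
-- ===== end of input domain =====

-- B replaces A's binary search by a closed-form ceiling division (O(1) instead of O(log x)).

-- ===== PORT A =====
-- A's while-loop; state (left, right), terminates since right + 1 - left strictly decreases.
def findratioLoop (x y ratio : Int) (l r : Int) : Int :=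
  if h : l ≤ r then
    let mid := PySem.Int.floordiv (l + r) 2
    let newratio := PySem.Int.floordiv ((y + mid) * 100) (x + mid)
    if ratio < newratio then findratioLoop x y ratio l (mid - 1)
    else findratioLoop x y ratio (mid + 1) r
  else l
termination_by (r + 1 - l).toNat
decreasing_by
  · have := PySem.Int.floordiv_two_mid_bounds h
    omega
  · have := PySem.Int.floordiv_two_mid_bounds h
    omega

def findratio (x : Int) (y : Int) : Int :=
  let ratio := PySem.Int.floordiv (100 * y) x
  if 99 ≤ ratio then -1
  else findratioLoop x y ratio 0 x

-- ===== PORT B =====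
def findratio_alt (x : Int) (y : Int) : Int :=
  let ratio := PySem.Int.floordiv (100 * y) x
  if 99 ≤ ratio then -1
  else
    let num := (ratio + 1) * x - 100 * y
    let d := 99 - ratio
    PySem.Int.floordiv (num + d - 1) d

-- ===== PRECONDITION & SPEC =====
-- Pre_ excludes x = 0, where the Python A raises ZeroDivisionError, and the inputs with
-- x < 0 and ratio < 99 outside the problem's natural domain, where A's loop never runs
-- (right = x < left) and its returned 0 is leftover loop state.
def Pre_findratio (x : Int) (y : Int) : Prop :=
  1 ≤ x ∨ (x ≤ -1 ∧ 99 ≤ PySem.Int.floordiv (100 * y) x)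
instance (x : Int) (y : Int) : Decidable (Pre_findratio x y) := by unfold Pre_findratio; infer_instance
def pvWitness_findratio : Int × Int := (10, 8)

def Spec_findratio (x : Int) (y : Int) (out : Int) : Prop := out = findratio_alt x y
instance (x : Int) (y : Int) (out : Int) : Decidable (Spec_findratio x y out) := by unfold Spec_findratio; infer_instance

-- ===== CLAIM (what is proved, stated in full; the proofs are below) =====
def Claim_equal_findratio : Prop := ∀ (x : Int) (y : Int), Dom_findratio x y → Pre_findratio x y → Spec_findratio x y (findratio x y)

-- ===== LEMMAS AND PROOFS =====

-- Characterization of B's closed form M: for 0 < d, M = ⌈num/d⌉, i.e. m ≥ M ↔ d*m ≥ num.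
theorem ceil_le_iff (num d m : Int) (hd : 0 < d) :
    PySem.Int.floordiv (num + d - 1) d ≤ m ↔ num ≤ m * d := by
  rw [PySem.Int.floordiv_eq_ediv_of_pos hd]
  constructor
  · intro h
    have h1 := Int.mul_ediv_add_emod (num + d - 1) d
    have h2 := Int.emod_nonneg (num + d - 1) (by omega : d ≠ 0)
    have h3 := Int.emod_lt_of_pos (num + d - 1) hd
    nlinarith [mul_le_mul_of_nonneg_left h (le_of_lt hd)]
  · intro h
    have : (num + d - 1) / d ≤ (m * d + d - 1) / d := by
      apply Int.ediv_le_ediv hd; omega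
    have heq : (m * d + d - 1) / d = m := by
      rw [show m * d + d - 1 = (d - 1) + m * d from by ring,
        Int.add_mul_ediv_right _ _ (by omega : d ≠ 0),
        Int.ediv_eq_zero_of_lt (by omega) (by omega)]
      omega
    omega

-- The predicate of A's binary search, rewritten: for 0 ≤ m and 1 ≤ x,
--   ratio < (y+m)*100 // (x+m)  ↔  M ≤ m      (where M is B's closed form).
theorem pred_iff (x y m : Int) (hx : 1 ≤ x) (hm : 0 ≤ m)
    (hZ : PySem.Int.floordiv (100 * y) x ≤ 98) :
    (PySem.Int.floordiv (100 * y) x < PySem.Int.floordiv ((y + m) * 100) (x + m)) ↔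
      PySem.Int.floordiv
        (((PySem.Int.floordiv (100 * y) x + 1) * x - 100 * y) + (99 - PySem.Int.floordiv (100 * y) x) - 1)
        (99 - PySem.Int.floordiv (100 * y) x) ≤ m := by
  set Z := PySem.Int.floordiv (100 * y) x with hZdef
  have hd : 0 < 99 - Z := by omega
  rw [ceil_le_iff _ _ _ hd]
  have hxm : 0 < x + m := by omega
  rw [show (Z < PySem.Int.floordiv ((y + m) * 100) (x + m)) ↔
        (Z + 1 ≤ PySem.Int.floordiv ((y + m) * 100) (x + m)) by omega]
  rw [PySem.Int.le_floordiv_iff_mul_le hxm]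
  constructor <;> intro h <;> nlinarith

-- Bounds on B's closed form: 1 ≤ M ≤ x (so the search interval [0,x] always contains M).
theorem Mbounds (x y : Int) (hx : 1 ≤ x) (hZ : PySem.Int.floordiv (100 * y) x ≤ 98) :
    1 ≤ PySem.Int.floordiv
        (((PySem.Int.floordiv (100 * y) x + 1) * x - 100 * y) + (99 - PySem.Int.floordiv (100 * y) x) - 1)
        (99 - PySem.Int.floordiv (100 * y) x) ∧
    PySem.Int.floordiv
        (((PySem.Int.floordiv (100 * y) x + 1) * x - 100 * y) + (99 - PySem.Int.floordiv (100 * y) x) - 1)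
        (99 - PySem.Int.floordiv (100 * y) x) ≤ x := by
  set Z := PySem.Int.floordiv (100 * y) x with hZdef
  have hd : 0 < 99 - Z := by omega
  -- num = (Z+1)x - 100y ∈ [1, x]
  have hchar : Z * x ≤ 100 * y ∧ 100 * y < (Z + 1) * x := by
    have := (PySem.Int.floordiv_eq_iff_of_pos (by omega : 0 < x)).1 hZdef.symm
    exact this
  have hnum1 : 1 ≤ (Z + 1) * x - 100 * y := by omega
  have hnumx : (Z + 1) * x - 100 * y ≤ x := by nlinarith [hchar.1]
  constructor
  · by_contra hcon
    have h0 : PySem.Int.floordiv ((Z + 1) * x - 100 * y + (99 - Z) - 1) (99 - Z) ≤ 0 := by omega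
    have := (ceil_le_iff _ _ 0 hd).1 h0
    omega
  · rw [ceil_le_iff _ _ _ hd]
    nlinarith

-- Loop invariant: if 0 ≤ l ≤ M ≤ r + 1 ≤ x + 1 then the binary search returns M.
theorem loop_eq (x y Z M : Int)
    (hiff : ∀ m, 0 ≤ m → ((Z < PySem.Int.floordiv ((y + m) * 100) (x + m)) ↔ M ≤ m)) :
    ∀ (n : Nat) (l r : Int), (r + 1 - l).toNat ≤ n → 0 ≤ l → l ≤ M → M ≤ r + 1 →
      findratioLoop x y Z l r = M := by
  intro n
  induction n with
  | zero =>
    intro l r hn h0 hlM hMr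
    rw [findratioLoop]
    rw [dif_neg (by omega)]
    omega
  | succ k ih =>
    intro l r hn h0 hlM hMr
    rw [findratioLoop]
    by_cases hlr : l ≤ r
    · rw [dif_pos hlr]
      have hmid := PySem.Int.floordiv_two_mid_bounds hlr
      set mid := PySem.Int.floordiv (l + r) 2 with hmiddef
      have hp := hiff mid (by omega)
      by_cases hc : Z < PySem.Int.floordiv ((y + mid) * 100) (x + mid)
      · rw [if_pos hc]
        have hMmid := hp.1 hc
        exact ih l (mid - 1) (by omega) h0 hlM (by omega)
      · rw [if_neg hc]
        have : ¬ M ≤ mid := fun h => hc (hp.2 h)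
        exact ih (mid + 1) r (by omega) (by omega) (by omega) hMr
    · rw [dif_neg hlr]
      omega

-- ===== VERDICT (by name: the statement is the Claim_ definition above) =====
theorem findratio_spec : Claim_equal_findratio := by
  intro x y _ hpre
  unfold Spec_findratio findratio findratio_alt
  set Z := PySem.Int.floordiv (100 * y) x with hZdef
  by_cases h99 : 99 ≤ Z
  · simp [h99]
  · have hx : 1 ≤ x := by
      rcases hpre with h | h
      · exact h
      · exact absurd h.2 h99
    have hZ : Z ≤ 98 := by omega
    simp only [if_neg h99]
    have hM := Mbounds x y hx hZ
    exact loop_eq x y Z _ (fun m hm => pred_iff x y m hx hm hZ)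
      (x + 1 - 0).toNat 0 x (by omega) (by omega) (by omega) (by omega)
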